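-- pv_equiv track=rewrite | github.com/Jv131103/estudos_python | problemas_fase2/problema2/src/tratar.py | trata_string
-- ===== SOURCE A (Python) =====
-- def trata_caracteres_especiais(text):
--     novo = ""
--
--     for c in text:
--         cod = ord(c)
--
--         if (
--             65 <= cod <= 90
--             or 97 <= cod <= 122
--             or 48 <= cod <= 57
--         ):
--             novo += c
--
--     return novo
--
-- def trata_string(text):
--     """
--     Lembre disso:
--
--         ord('a')  # 97
--         ord('A')  # 65
--
--     Existe uma diferença fixa entre elas.
--
--         ord('a') - ord('A')  # quanto dá?
--
--         R: 32
--
--     Agora testa: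
--
--         chr(ord('A') + 32)
--         chr(ord('a') - 32)
--
--     """
--     text = trata_caracteres_especiais(text)
--
--     new = []
--
--     for value in text:
--         if 'A' <= value <= 'Z':
--             value = chr(ord(value) + 32)
--
--         new.append(value)
--
--     return "".join(new)
-- ===== SOURCE B (Python) =====
-- import re
--
-- def trata_string(text):
--     # regex substitution deletes everything outside [0-9A-Za-z], then one lower()
--     return re.sub(r'[^0-9A-Za-z]', '', text).lower()
-- ===== Notes on version B (the rewrite author's own statement) =====
-- stated objective: idiomatic
-- what changed: Replaces the explicit per-character ord-range filtering loop (with quadratic string +=) and the separate manual case-shifting pass (chr(ord(c)+32)) with a single C-level regex substitution deleting non-alphanumerics followed by str.lower().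
import Mathlib
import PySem

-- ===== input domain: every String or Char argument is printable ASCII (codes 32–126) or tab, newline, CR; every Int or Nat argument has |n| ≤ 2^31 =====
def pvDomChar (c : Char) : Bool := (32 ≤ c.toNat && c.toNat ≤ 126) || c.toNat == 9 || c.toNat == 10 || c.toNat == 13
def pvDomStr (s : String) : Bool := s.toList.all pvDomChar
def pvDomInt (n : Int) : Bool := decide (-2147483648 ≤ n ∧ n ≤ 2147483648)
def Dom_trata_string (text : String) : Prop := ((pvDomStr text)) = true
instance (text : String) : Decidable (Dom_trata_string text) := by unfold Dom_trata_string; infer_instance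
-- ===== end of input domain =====

-- B replaces A's ord-range filtering loop and manual case-shifting pass with one
-- regex-style deletion of non-alphanumerics followed by lower() (idiomatic).

-- ===== PORT A =====
def trata_caracteres_especiais (text : String) : String :=
  String.ofList (text.toList.foldl (fun novo c =>
    let cod := c.toNat
    if (65 ≤ cod ∧ cod ≤ 90) ∨ (97 ≤ cod ∧ cod ≤ 122) ∨ (48 ≤ cod ∧ cod ≤ 57)
    then novo ++ [c] else novo) [])

def trata_string (text : String) : String :=
  let text := trata_caracteres_especiais text
  let new := text.toList.foldl (fun new value =>
    let value := if 'A' ≤ value ∧ value ≤ 'Z' then Char.ofNat (value.toNat + 32) else value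
    new ++ [value]) ([] : List Char)
  String.ofList new

-- ===== PORT B =====
-- re.sub(r'[^0-9A-Za-z]', '', text) ported as filtering by the character class; then .lower()
def trata_string_alt (text : String) : String :=
  PySem.Str.lower (String.ofList (text.toList.filter (fun c =>
    (decide ('0' ≤ c) && decide (c ≤ '9')) ||
    (decide ('A' ≤ c) && decide (c ≤ 'Z')) ||
    (decide ('a' ≤ c) && decide (c ≤ 'z')))))

-- ===== PRECONDITION & SPEC =====
def Spec_trata_string (text : String) (out : String) : Prop := out = trata_string_alt text
instance (text : String) (out : String) : Decidable (Spec_trata_string text out) := by unfold Spec_trata_string; infer_instance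

-- ===== CLAIM (what is proved, stated in full; the proofs are below) =====
def Claim_equal_trata_string : Prop := ∀ (text : String), Dom_trata_string text → Spec_trata_string text (trata_string text)

-- ===== LEMMAS AND PROOFS =====

-- A's ord-range test coincides with B's character-class test
theorem pv_filter_eq (c : Char) :
    decide ((65 ≤ c.toNat ∧ c.toNat ≤ 90) ∨ (97 ≤ c.toNat ∧ c.toNat ≤ 122) ∨ (48 ≤ c.toNat ∧ c.toNat ≤ 57)) =
    ((decide ('0' ≤ c) && decide (c ≤ '9')) ||
     (decide ('A' ≤ c) && decide (c ≤ 'Z')) ||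
     (decide ('a' ≤ c) && decide (c ≤ 'z'))) := by
  have h : ((65 ≤ c.toNat ∧ c.toNat ≤ 90) ∨ (97 ≤ c.toNat ∧ c.toNat ≤ 122) ∨ (48 ≤ c.toNat ∧ c.toNat ≤ 57)) ↔
      (('0' ≤ c ∧ c ≤ '9') ∨ ('A' ≤ c ∧ c ≤ 'Z') ∨ ('a' ≤ c ∧ c ≤ 'z')) := by
    simp only [Char.le_def, Char.toNat, UInt32.le_iff_toNat_le,
      show ('0' : Char).val.toNat = 48 from rfl, show ('9' : Char).val.toNat = 57 from rfl,
      show ('A' : Char).val.toNat = 65 from rfl, show ('Z' : Char).val.toNat = 90 from rfl,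
      show ('a' : Char).val.toNat = 97 from rfl, show ('z' : Char).val.toNat = 122 from rfl]
    omega
  simp only [h, Bool.decide_or, Bool.decide_and, Bool.or_assoc]

-- A's case-shifting body is PySem's lowerChar
theorem pv_shift_eq (c : Char) :
    (if 'A' ≤ c ∧ c ≤ 'Z' then Char.ofNat (c.toNat + 32) else c) = PySem.Chars.lowerChar c := by
  simp only [PySem.Chars.lowerChar, PySem.Chars.isupper, Bool.and_eq_true, decide_eq_true_eq]

-- ===== VERDICT (by name: the statement is the Claim_ definition above) =====
theorem trata_string_spec : Claim_equal_trata_string := by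
  intro text _
  unfold Spec_trata_string trata_string trata_string_alt trata_caracteres_especiais
  simp only [PySem.List.foldl_append_ite_eq_filter, List.nil_append,
    PySem.List.foldl_append_singleton_eq_map, PySem.Str.lower, PySem.Chars.lower,
    String.toList_ofList]
  rw [List.filter_congr (fun c _ => pv_filter_eq c)]
  exact congrArg String.ofList (List.map_congr_left (fun c _ => pv_shift_eq c))
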